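-- pv_equiv track=rewrite | github.com/ianaspivac/security-labs | searchOption.py | saveOptions
-- ===== SOURCE A (Python) =====
-- def saveOptions(listKeywords, string):
--     arrayString = string.split()
--     options = []
--     openBracketFlag = False
--     for keyword in listKeywords:
--         openBracketFlag = False
--         for word in arrayString:
--             if keyword+'"' in word or openBracketFlag:
--                 options.append(word)
--                 openBracketFlag = True
--             if openBracketFlag and "]" == word:
--                 break;
--     return ("{"+''.join(options)+"}")
-- ===== SOURCE B (Python) =====
-- def saveOptions(listKeywords, string):
--     words = string.split()
--     # segment starting at each position: words up to and including the first "]" (or to the end),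
--     # built once back-to-front as a suffix DP
--     segs = []
--     tail = []
--     for w in reversed(words):
--         tail = [w] if w == "]" else [w] + tail
--         segs.append(tail)
--     segs.reverse()
--     # one word-major pass recording, per keyword, the segment at its first matching word
--     first = {}
--     for w, seg in zip(words, segs):
--         for kw in listKeywords:
--             if kw not in first and kw + '"' in w:
--                 first[kw] = seg
--     return "{" + "".join("".join(first[kw]) for kw in listKeywords if kw in first) + "}"
-- ===== Notes on version B (the rewrite author's own statement) =====
-- stated objective: alternative
-- what changed: Replaces A's per-keyword flagged scans (openBracketFlag threaded through the word loop with a break) by a back-to-front suffix DP that precomputes the bracket segment starting at every word position, plus a single word-major pass over (word, segment) pairs that fills a first-match dict per keyword; the output is then assembled by keyword-order dict lookups.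
import Mathlib
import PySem

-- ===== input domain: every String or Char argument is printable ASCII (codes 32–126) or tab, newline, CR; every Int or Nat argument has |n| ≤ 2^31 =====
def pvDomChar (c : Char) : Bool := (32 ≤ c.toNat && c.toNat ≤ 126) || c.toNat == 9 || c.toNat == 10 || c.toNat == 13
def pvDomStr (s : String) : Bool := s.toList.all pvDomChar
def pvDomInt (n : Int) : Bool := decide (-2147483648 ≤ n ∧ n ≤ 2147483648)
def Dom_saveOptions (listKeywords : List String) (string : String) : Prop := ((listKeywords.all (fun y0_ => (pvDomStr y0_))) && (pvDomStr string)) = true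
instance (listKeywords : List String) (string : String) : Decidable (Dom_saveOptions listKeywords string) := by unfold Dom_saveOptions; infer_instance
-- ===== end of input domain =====

-- B replaces A's per-keyword flagged scans by a back-to-front suffix DP of bracket segments plus
-- ONE word-major pass filling a first-match dict per keyword (objective: alternative; same cost).


-- ===== PORT A =====
-- inner 'for word in arrayString' loop of A, with its openBracketFlag state and 'break';
-- returns the words this keyword's pass appends to options, in order
def pvInnerA (keyword : String) : List String → Bool → List String
  | [], _ => []
  | word :: ws, openBracketFlag =>
    if PySem.Str.isIn (keyword ++ "\"") word || openBracketFlag then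
      -- word appended, flag now true; then the break test 'flag and "]" == word'
      if word == "]" then [word] else word :: pvInnerA keyword ws true
    else
      pvInnerA keyword ws openBracketFlag

def saveOptions (listKeywords : List String) (string : String) : String :=
  let arrayString := PySem.Str.split₀ string
  let options := listKeywords.foldl (fun opts keyword => opts ++ pvInnerA keyword arrayString false) []
  "{" ++ PySem.Str.join "" options ++ "}"

-- ===== PORT B =====
-- Source B's back-to-front suffix DP: for every position, the words from there up to and including
-- the first "]" (or to the end); pvSegs returns that segment list front-to-back
def pvSegs : List String → List (List String)
  | [] => []
  | w :: ws =>
    let rest := pvSegs ws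
    (if w == "]" then [w] else w :: rest.headD []) :: rest

-- Source B's inner 'for kw in listKeywords' body at one (word, seg) pair: record first matches
def pvFillStep (listKeywords : List String) (w : String) (seg : List String)
    (d : PySem.Dict String (List String)) : PySem.Dict String (List String) :=
  listKeywords.foldl
    (fun d kw => if !(d.contains kw) && PySem.Str.isIn (kw ++ "\"") w then d.insert kw seg else d) d

def saveOptions_alt (listKeywords : List String) (string : String) : String :=
  let words := PySem.Str.split₀ string
  let segs := pvSegs words
  let first := (words.zip segs).foldl (fun d p => pvFillStep listKeywords p.1 p.2 d) PySem.Dict.empty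
  "{" ++ PySem.Str.join "" (listKeywords.filterMap (fun kw => (first.get? kw).map (PySem.Str.join ""))) ++ "}"

-- ===== PRECONDITION & SPEC =====
def Spec_saveOptions (listKeywords : List String) (string : String) (out : String) : Prop := out = saveOptions_alt listKeywords string
instance (listKeywords : List String) (string : String) (out : String) : Decidable (Spec_saveOptions listKeywords string out) := by unfold Spec_saveOptions; infer_instance

-- ===== CLAIM (what is proved, stated in full; the proofs are below) =====
def Claim_equal_saveOptions : Prop := ∀ (listKeywords : List String) (string : String), Dom_saveOptions listKeywords string → Spec_saveOptions listKeywords string (saveOptions listKeywords string)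

-- ===== LEMMAS AND PROOFS =====

-- proof-side vocabulary: the segment from the head of a word list through the first exact "]"
def pvCloseTake (rest : List String) : List String :=
  match rest.findIdx? (fun w => w == "]") with
  | some j => rest.take (j + 1)
  | none => rest

-- the first matching segment for one keyword, as an option (the common characterisation)
def pvFindSeg (kw : String) : List String → Option (List String)
  | [] => none
  | w :: ws => if PySem.Str.isIn (kw ++ "\"") w then some (pvCloseTake (w :: ws)) else pvFindSeg kw ws

theorem pvCloseTake_cons (w : String) (ws : List String) :
    pvCloseTake (w :: ws) = if w = "]" then ["]"] else w :: pvCloseTake ws := by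
  by_cases h : w = "]"
  · subst h; simp [pvCloseTake, List.findIdx?_cons]
  · cases hf : ws.findIdx? (fun w => w == "]") with
    | none =>
      simp [pvCloseTake, List.findIdx?_cons, show (w == "]") = false by simp [h], hf, h]
    | some j =>
      simp [pvCloseTake, List.findIdx?_cons, show (w == "]") = false by simp [h], hf, h,
        List.take_succ_cons]

-- once the flag is set, A takes words up to and including the first exact "]"
theorem pvInnerA_true (kw : String) (ws : List String) :
    pvInnerA kw ws true = pvCloseTake ws := by
  induction ws with
  | nil => simp [pvInnerA, pvCloseTake]
  | cons w ws ih =>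
    rw [pvCloseTake_cons]
    by_cases h : w = "]"
    · subst h; simp [pvInnerA]
    · simp [pvInnerA, show (w == "]") = false by simp [h], h, ih]

-- A's whole inner pass computes the first matching segment
theorem pvInnerA_eq_findSeg (kw : String) (ws : List String) :
    pvInnerA kw ws false = (pvFindSeg kw ws).getD [] := by
  induction ws with
  | nil => simp [pvInnerA, pvFindSeg]
  | cons w ws ih =>
    cases h : PySem.Str.isIn (kw ++ "\"") w with
    | true =>
      have h' : PySem.Chars.isIn (kw.toList ++ ['\"']) w.toList = true := by simpa using h
      rw [pvFindSeg, if_pos (by simpa using h'), pvCloseTake_cons]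
      by_cases hc : w = "]"
      · subst hc
        simp [pvInnerA, show PySem.Chars.isIn (kw.toList ++ ['\"']) [']'] = true from h']
      · simp [pvInnerA, h', show (w == "]") = false by simp [hc], hc, pvInnerA_true]
    | false =>
      have h' : PySem.Chars.isIn (kw.toList ++ ['\"']) w.toList = false := by simpa using h
      rw [pvFindSeg, if_neg (by simp [h'])]
      simpa [pvInnerA, h'] using ih

-- B's suffix DP produces exactly the close-take segment at every position
theorem pvSegs_headD (ws : List String) : (pvSegs ws).head?.getD [] = pvCloseTake ws := by
  induction ws with
  | nil => simp [pvSegs, pvCloseTake]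
  | cons w ws ih =>
    rw [pvCloseTake_cons]
    by_cases h : w = "]" <;> simp [pvSegs, h] <;> rw [← ih] <;> simp

theorem pvSegs_cons (w : String) (ws : List String) :
    pvSegs (w :: ws) = pvCloseTake (w :: ws) :: pvSegs ws := by
  rw [pvCloseTake_cons]; by_cases h : w = "]" <;> simp [pvSegs, h, pvSegs_headD]

-- one fill step: only the keywords of the list, at their first match, get inserted
theorem pvFillStep_get (kws : List String) (w : String) (seg : List String)
    (d : PySem.Dict String (List String)) (kw : String) :
    (pvFillStep kws w seg d).get? kw =
      if kw ∈ kws ∧ d.get? kw = none ∧ PySem.Str.isIn (kw ++ "\"") w then some seg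
      else d.get? kw := by
  induction kws generalizing d with
  | nil => simp [pvFillStep]
  | cons kw' kws ih =>
    rw [pvFillStep, List.foldl_cons]
    rw [show (kws.foldl
        (fun d kw => if !(d.contains kw) && PySem.Str.isIn (kw ++ "\"") w then d.insert kw seg else d)
        (if !(d.contains kw') && PySem.Str.isIn (kw' ++ "\"") w then d.insert kw' seg else d)) =
      pvFillStep kws w seg
        (if !(d.contains kw') && PySem.Str.isIn (kw' ++ "\"") w then d.insert kw' seg else d) from rfl]
    rw [ih]
    by_cases hk : kw = kw'
    · subst hk
      by_cases hc : (!(d.contains kw) && PySem.Str.isIn (kw ++ "\"") w) = true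
      · have hnone : d.get? kw = none := by
          have := hc
          simp only [Bool.and_eq_true, Bool.not_eq_true'] at this
          rcases this with ⟨h1, _⟩
          rw [PySem.Dict.contains_eq_isSome_get?] at h1
          cases hget : d.get? kw <;> simp [hget] at h1 ⊢
        have hin : PySem.Str.isIn (kw ++ "\"") w = true := by
          simp only [Bool.and_eq_true] at hc; exact hc.2
        simp only [hc, if_true, PySem.Dict.get?_insert_self]
        rw [if_neg (by simp), if_pos ⟨List.mem_cons_self .., hnone, hin⟩]
      · rw [if_neg hc]
        have hno : ¬ (d.get? kw = none ∧ PySem.Str.isIn (kw ++ "\"") w = true) := by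
          intro ⟨h1, h2⟩
          apply hc
          rw [PySem.Dict.contains_eq_isSome_get?, h1]
          simpa using h2
        rw [if_neg (fun hcon => hno hcon.2), if_neg (fun hcon => hno hcon.2)]
    · have hget' : (if !(d.contains kw') && PySem.Str.isIn (kw' ++ "\"") w then d.insert kw' seg else d).get? kw = d.get? kw := by
        split
        · rw [PySem.Dict.get?_insert]; simp [hk]
        · rfl
      rw [hget']
      simp [List.mem_cons, hk]
  termination_by kws.length

-- the whole word-major fill: lookup of a listed keyword = first matching segment of the zip
theorem pvFill_get (kws : List String) (pairs : List (String × List String))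
    (d : PySem.Dict String (List String)) (kw : String) (h : kw ∈ kws) :
    (pairs.foldl (fun d p => pvFillStep kws p.1 p.2 d) d).get? kw =
      match d.get? kw with
      | some v => some v
      | none => (pairs.find? (fun p => PySem.Str.isIn (kw ++ "\"") p.1)).map Prod.snd := by
  induction pairs generalizing d with
  | nil => cases hd : d.get? kw <;> simp [hd]
  | cons p pairs ih =>
    rw [List.foldl_cons, ih, pvFillStep_get]
    cases hd : d.get? kw with
    | some v => rw [if_neg (by simp)]
    | none =>
      cases hf : PySem.Str.isIn (kw ++ "\"") p.1 with
      | true =>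
        have hf' : PySem.Chars.isIn (kw.toList ++ ['\"']) p.1.toList = true := by simpa using hf
        rw [if_pos ⟨h, rfl, rfl⟩]; simp [hf']
      | false =>
        have hf' : PySem.Chars.isIn (kw.toList ++ ['\"']) p.1.toList = false := by simpa using hf
        rw [if_neg (by simp [hf])]; simp [hf']

-- the zip's first matching segment is pvFindSeg
theorem pvZip_find (kw : String) (ws : List String) :
    ((ws.zip (pvSegs ws)).find? (fun p => PySem.Str.isIn (kw ++ "\"") p.1)).map Prod.snd =
      pvFindSeg kw ws := by
  induction ws with
  | nil => simp [pvSegs, pvFindSeg]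
  | cons w ws ih =>
    rw [pvSegs_cons]
    cases hf : PySem.Str.isIn (kw ++ "\"") w with
    | true =>
      have hf' : PySem.Chars.isIn (kw.toList ++ ['\"']) w.toList = true := by simpa using hf
      simp [hf', pvFindSeg]
    | false =>
      have hf' : PySem.Chars.isIn (kw.toList ++ ['\"']) w.toList = false := by simpa using hf
      rw [pvFindSeg, if_neg (by simpa using hf')]
      rw [List.zip_cons_cons, List.find?_cons_of_neg (by simpa using hf')]
      exact ih

theorem pvIntercalate_nil (l : List (List Char)) : ([] : List Char).intercalate l = l.flatten := by
  induction l with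
  | nil => simp [List.intercalate]
  | cons a l ih => cases l <;> simp_all [List.intercalate, List.intersperse]

theorem pvJoin_cons (x : String) (xs : List String) :
    PySem.Str.join "" (x :: xs) = x ++ PySem.Str.join "" xs := by
  apply String.toList_injective
  simp [PySem.Str.join, PySem.Chars.join, pvIntercalate_nil]

theorem pvJoin_append (xs ys : List String) :
    PySem.Str.join "" (xs ++ ys) = PySem.Str.join "" xs ++ PySem.Str.join "" ys := by
  apply String.toList_injective
  simp [PySem.Str.join, PySem.Chars.join, pvIntercalate_nil]

-- joining flattened segments = joining each segment then joining the results
theorem pvJoin_flat (g : String → Option (List String)) (l : List String) :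
    PySem.Str.join "" (l.flatMap (fun kw => (g kw).getD [])) =
      PySem.Str.join "" (l.filterMap (fun kw => (g kw).map (PySem.Str.join ""))) := by
  induction l with
  | nil => simp
  | cons kw l ih =>
    rw [List.flatMap_cons, List.filterMap_cons]
    cases hg : g kw with
    | none => simpa [hg] using ih
    | some seg =>
      simp only [Option.getD_some, Option.map_some]
      rw [pvJoin_append, pvJoin_cons, ih]

theorem pvFoldl_append_eq_flatMap {α β : Type} (f : α → List β) (l : List α) (acc : List β) :
    l.foldl (fun opts a => opts ++ f a) acc = acc ++ l.flatMap f := by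
  induction l generalizing acc with
  | nil => simp
  | cons a l ih => simp [List.foldl_cons, ih]

-- ===== VERDICT (by name: the statement is the Claim_ definition above) =====
theorem saveOptions_spec : Claim_equal_saveOptions := by
  intro listKeywords string _
  unfold Spec_saveOptions saveOptions saveOptions_alt
  simp only [pvFoldl_append_eq_flatMap, List.nil_append]
  have hseg : ∀ kw, pvInnerA kw (PySem.Str.split₀ string) false =
      (pvFindSeg kw (PySem.Str.split₀ string)).getD [] := fun kw => pvInnerA_eq_findSeg kw _
  rw [List.flatMap_congr (fun kw _ => hseg kw)]
  rw [pvJoin_flat (fun kw => pvFindSeg kw (PySem.Str.split₀ string))]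
  have hlist : listKeywords.filterMap
      (fun kw => Option.map (PySem.Str.join "")
        ((((PySem.Str.split₀ string).zip (pvSegs (PySem.Str.split₀ string))).foldl
            (fun d p => pvFillStep listKeywords p.1 p.2 d) PySem.Dict.empty).get? kw)) =
      listKeywords.filterMap
        (fun kw => Option.map (PySem.Str.join "") (pvFindSeg kw (PySem.Str.split₀ string))) := by
    apply List.filterMap_congr
    intro kw hm
    rw [pvFill_get _ _ _ _ hm]
    simp only [PySem.Dict.get?_empty]
    rw [pvZip_find]
  rw [hlist]
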